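-- pv_equiv track=rewrite | github.com/Viagounet/FilesDSL | filesdsl/parser.py | _find_assignment
-- ===== SOURCE A (Python) =====
-- def _find_assignment(text: str) -> int:
--     depth = 0
--     in_quote: str | None = None
--     escaped = False
--     for idx, char in enumerate(text):
--         if in_quote is not None:
--             if escaped:
--                 escaped = False
--                 continue
--             if char == "\\":
--                 escaped = True
--                 continue
--             if char == in_quote:
--                 in_quote = None
--             continue
--
--         if char in {"'", '"'}:
--             in_quote = char
--             continue
--         if char in {"(", "["}:
--             depth += 1
--             continue
--         if char in {")", "]"}:
--             depth = max(depth - 1, 0)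
--             continue
--         if char != "=" or depth != 0:
--             continue
--
--         prev_char = text[idx - 1] if idx > 0 else ""
--         next_char = text[idx + 1] if idx + 1 < len(text) else ""
--         if prev_char in {"=", "!", "<", ">"} or next_char == "=":
--             continue
--         return idx
--     return -1
-- ===== SOURCE B (Python) =====
-- def _find_assignment(text: str) -> int:
--     # Stage 1: precompute, for every position, the scanner state *before* that char.
--     states = []
--     q, esc, depth = None, False, 0
--     for ch in text:
--         states.append((q, depth))
--         if q is not None:
--             if esc:
--                 esc = False
--             elif ch == "\\":
--                 esc = True
--             elif ch == q:
--                 q = None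
--         elif ch in "'\"":
--             q = ch
--         elif ch in "([":
--             depth += 1
--         elif ch in ")]":
--             depth = max(depth - 1, 0)
--     # Stage 2: first top-level '=' that is not part of ==, !=, <=, >=.
--     for (i, ch), (q, depth) in zip(enumerate(text), states):
--         if ch == "=" and q is None and depth == 0 \
--            and (i == 0 or text[i - 1] not in "=!<>") \
--            and (i + 1 == len(text) or text[i + 1] != "="):
--             return i
--     return -1
-- ===== Notes on version B (the rewrite author's own statement) =====
-- stated objective: alternative
-- what changed: Replaces A's single loop that interleaves state updates with the candidate test and an early return by two staged passes: pass one precomputes the (quote, depth) scanner state before every position into a list, pass two searches the zipped enumeration and state list for the first valid top-level assignment sign.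
import Mathlib
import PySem

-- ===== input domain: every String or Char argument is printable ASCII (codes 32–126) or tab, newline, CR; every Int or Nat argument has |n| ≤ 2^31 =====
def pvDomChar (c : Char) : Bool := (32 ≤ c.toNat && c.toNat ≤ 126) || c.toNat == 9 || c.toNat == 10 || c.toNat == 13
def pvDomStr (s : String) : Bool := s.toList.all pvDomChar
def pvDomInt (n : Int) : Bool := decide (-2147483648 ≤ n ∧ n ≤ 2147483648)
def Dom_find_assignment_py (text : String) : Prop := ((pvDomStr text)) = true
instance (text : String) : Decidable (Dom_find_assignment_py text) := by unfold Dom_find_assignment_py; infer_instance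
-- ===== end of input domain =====

-- B is a two-stage reformulation: precompute the per-position scanner states, then search
-- them for the first valid top-level '=' (objective: alternative decomposition, same O(n)).

-- ===== PORT A =====
-- A's single for-loop with state (depth, in_quote, escaped); early return via recursion result.
def pvALoop (text : List Char) : List Char → Nat → Nat → Option Char → Bool → Int
  | [], _, _, _, _ => -1
  | c :: cs, idx, depth, some q, esc =>
      if esc then pvALoop text cs (idx + 1) depth (some q) false
      else if c = '\\' then pvALoop text cs (idx + 1) depth (some q) true
      else if c = q then pvALoop text cs (idx + 1) depth none false
      else pvALoop text cs (idx + 1) depth (some q) false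
  | c :: cs, idx, depth, none, _ =>
      if c = '\'' ∨ c = '"' then pvALoop text cs (idx + 1) depth (some c) false
      else if c = '(' ∨ c = '[' then pvALoop text cs (idx + 1) (depth + 1) none false
      else if c = ')' ∨ c = ']' then pvALoop text cs (idx + 1) (depth - 1) none false
      else if c ≠ '=' ∨ depth ≠ 0 then pvALoop text cs (idx + 1) depth none false
      else
        -- prev_char = text[idx-1] if idx > 0 else ""; next_char = text[idx+1] if idx+1 < len else ""
        if (idx > 0 ∧ (text[idx - 1]? = some '=' ∨ text[idx - 1]? = some '!' ∨
                       text[idx - 1]? = some '<' ∨ text[idx - 1]? = some '>'))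
           ∨ text[idx + 1]? = some '='
        then pvALoop text cs (idx + 1) depth none false
        else (idx : Int)

def find_assignment_py (text : String) : Int :=
  pvALoop text.toList text.toList 0 0 none false

-- ===== PORT B =====
-- One step of Source B's stage-1 state update: state = (q, esc, depth).
def pvStep : (Option Char × Bool × Nat) → Char → (Option Char × Bool × Nat)
  | (some q, esc, depth), c =>
      if esc then (some q, false, depth)
      else if c = '\\' then (some q, true, depth)
      else if c = q then (none, esc, depth)
      else (some q, esc, depth)
  | (none, esc, depth), c =>
      if c = '\'' ∨ c = '"' then (some c, esc, depth)
      else if c = '(' ∨ c = '[' then (none, esc, depth + 1)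
      else if c = ')' ∨ c = ']' then (none, esc, depth - 1)
      else (none, esc, depth)

-- Stage 1: the list `states` of (q, depth) before each position.
def pvStates : (Option Char × Bool × Nat) → List Char → List (Option Char × Nat)
  | _, [] => []
  | s, c :: cs => (s.1, s.2.2) :: pvStates (pvStep s c) cs

-- enumerate(text) starting at a given index.
def pvEnumFrom : Nat → List Char → List (Nat × Char)
  | _, [] => []
  | i, c :: cs => (i, c) :: pvEnumFrom (i + 1) cs

-- Stage 2: scan zip(enumerate(text), states) for the first valid top-level '='.
def pvSearch (text : List Char) : List ((Nat × Char) × (Option Char × Nat)) → Int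
  | [] => -1
  | ((i, c), (q, depth)) :: rest =>
      if c = '=' ∧ q = none ∧ depth = 0 ∧
         (i = 0 ∨ ¬(text[i - 1]? = some '=' ∨ text[i - 1]? = some '!' ∨
                    text[i - 1]? = some '<' ∨ text[i - 1]? = some '>')) ∧
         (i + 1 = text.length ∨ ¬ text[i + 1]? = some '=')
      then (i : Int) else pvSearch text rest

def find_assignment_py_alt (text : String) : Int :=
  pvSearch text.toList ((pvEnumFrom 0 text.toList).zip (pvStates (none, false, 0) text.toList))

-- ===== PRECONDITION & SPEC =====
def Spec_find_assignment_py (text : String) (out : Int) : Prop := out = find_assignment_py_alt text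
instance (text : String) (out : Int) : Decidable (Spec_find_assignment_py text out) := by unfold Spec_find_assignment_py; infer_instance

-- ===== CLAIM (what is proved, stated in full; the proofs are below) =====
def Claim_equal_find_assignment_py : Prop := ∀ (text : String), Dom_find_assignment_py text → Spec_find_assignment_py text (find_assignment_py text)

-- ===== LEMMAS AND PROOFS =====

-- A's early-returning loop equals B's search over the annotated suffix, for any start state
-- in which esc is false whenever the quote is closed (the reachable states).
theorem pvMain (text : List Char) (cs : List Char) (idx depth : Nat) (q : Option Char) (esc : Bool)
    (h : q = none → esc = false) :
    pvALoop text cs idx depth q esc =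
      pvSearch text ((pvEnumFrom idx cs).zip (pvStates (q, esc, depth) cs)) := by
  induction cs generalizing idx depth q esc with
  | nil => simp [pvALoop, pvEnumFrom, pvStates, pvSearch]
  | cons c cs ih =>
    rw [pvEnumFrom, pvStates]
    simp only [List.zip_cons_cons]
    match q with
    | some qc =>
      rw [pvSearch]
      rw [if_neg (by simp)]
      rw [pvALoop, pvStep]
      cases esc with
      | true =>
        rw [if_pos rfl, if_pos rfl]
        exact ih (idx + 1) depth (some qc) false (by simp)
      | false =>
        by_cases hb : c = '\\'
        · simp only [if_neg (show ¬(false = true) by simp), if_pos hb]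
          exact ih (idx + 1) depth (some qc) true (by simp)
        · by_cases hq : c = qc
          · simp only [if_neg (show ¬(false = true) by simp), if_neg hb, if_pos hq]
            exact ih (idx + 1) depth none false (fun _ => rfl)
          · simp only [if_neg (show ¬(false = true) by simp), if_neg hb, if_neg hq]
            exact ih (idx + 1) depth (some qc) false (by simp)
    | none =>
      have hesc : esc = false := h rfl
      subst hesc
      rw [pvALoop, pvStep, pvSearch]
      by_cases hquote : c = '\'' ∨ c = '"'
      · rw [if_pos hquote, if_pos hquote, if_neg (by rcases hquote with h | h <;> simp [h])]
        exact ih (idx + 1) depth (some c) false (by simp)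
      · rw [if_neg hquote, if_neg hquote]
        by_cases hopen : c = '(' ∨ c = '['
        · rw [if_pos hopen, if_pos hopen, if_neg (by rcases hopen with h | h <;> simp [h])]
          exact ih (idx + 1) (depth + 1) none false (fun _ => rfl)
        · rw [if_neg hopen, if_neg hopen]
          by_cases hclose : c = ')' ∨ c = ']'
          · rw [if_pos hclose, if_pos hclose, if_neg (by rcases hclose with h | h <;> simp [h])]
            exact ih (idx + 1) (depth - 1) none false (fun _ => rfl)
          · rw [if_neg hclose, if_neg hclose]
            by_cases hskip : c ≠ '=' ∨ depth ≠ 0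
            · rw [if_pos hskip, if_neg (by tauto)]
              exact ih (idx + 1) depth none false (fun _ => rfl)
            · push Not at hskip
              obtain ⟨hc, hd⟩ := hskip
              rw [if_neg (by simp [hc, hd])]
              -- neighbour-condition equivalence
              by_cases hA : (idx > 0 ∧ (text[idx - 1]? = some '=' ∨ text[idx - 1]? = some '!' ∨
                              text[idx - 1]? = some '<' ∨ text[idx - 1]? = some '>'))
                            ∨ text[idx + 1]? = some '='
              · rw [if_pos hA, if_neg ?_]
                · exact ih (idx + 1) depth none false (fun _ => rfl)
                · intro hB
                  obtain ⟨-, -, -, hprev, hnext⟩ := hB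
                  rcases hA with ⟨hpos, hmem⟩ | hnx
                  · rcases hprev with h0 | hnp
                    · omega
                    · exact hnp hmem
                  · rcases hnext with hlen | hne
                    · rw [List.getElem?_eq_none (by omega)] at hnx; simp at hnx
                    · exact hne hnx
              · rw [if_neg hA, if_pos ?_]
                push Not at hA
                obtain ⟨hprev, hnext⟩ := hA
                refine ⟨hc, rfl, hd, ?_, Or.inr hnext⟩
                by_cases h0 : idx = 0
                · exact Or.inl h0
                · exact Or.inr (by have := hprev (by omega); tauto)

-- ===== VERDICT (by name: the statement is the Claim_ definition above) =====
theorem find_assignment_py_spec : Claim_equal_find_assignment_py := by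
  intro text _
  unfold Spec_find_assignment_py find_assignment_py find_assignment_py_alt
  exact pvMain _ _ 0 0 none false (fun _ => rfl)
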